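-- pv_equiv track=rewrite | github.com/Julesc013/dominium | tools/xstack/testx/tests/sol0_testlib.py | _rows_by_key
-- ===== SOURCE A (Python) =====
-- from typing import Dict, List, Mapping
--
-- def _as_list(value: object) -> List[object]:
--     return list(value or []) if isinstance(value, list) else []
--
-- def _rows_by_key(rows: object, key: str) -> Dict[str, dict]:
--     out: Dict[str, dict] = {}
--     for row in _as_list(rows):
--         if not isinstance(row, Mapping):
--             continue
--         token = str(dict(row).get(key, "")).strip()
--         if token:
--             out[token] = dict(row)
--     return dict((token, dict(out[token])) for token in sorted(out.keys()))
-- ===== SOURCE B (Python) =====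
-- from typing import Dict, List, Mapping
--
-- def _as_list(value: object) -> List[object]:
--     return list(value or []) if isinstance(value, list) else []
--
-- def _rows_by_key(rows: object, key: str) -> Dict[str, dict]:
--     # Scan the rows BACKWARDS with a first-wins seen-set (the last original
--     # occurrence of a token is met first), inserting each new (token, copy)
--     # pair at its sorted position in an always-sorted list; no dict is built
--     # during the loop and no sort call is needed.
--     result: List[tuple] = []  # (token, row-copy) pairs, ascending by token
--     seen = set()
--     for row in reversed(_as_list(rows)):
--         if not isinstance(row, Mapping):
--             continue
--         token = str(dict(row).get(key, "")).strip()
--         if not token or token in seen: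
--             continue
--         seen.add(token)
--         i = 0
--         while i < len(result) and result[i][0] < token:
--             i += 1
--         result.insert(i, (token, dict(row)))
--     return dict(result)
-- ===== Notes on version B (the rewrite author's own statement) =====
-- stated objective: alternative
-- what changed: B scans the rows in reverse with a first-wins seen-set (so the last original occurrence of each token is the one kept, with no overwrite semantics) and places each new (token, row-copy) pair at its sorted position in an always-sorted list; no dict is maintained during the loop and no sort call is made, versus A's forward dedup-dict pass followed by sorted(out.keys()).
import Mathlib
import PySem

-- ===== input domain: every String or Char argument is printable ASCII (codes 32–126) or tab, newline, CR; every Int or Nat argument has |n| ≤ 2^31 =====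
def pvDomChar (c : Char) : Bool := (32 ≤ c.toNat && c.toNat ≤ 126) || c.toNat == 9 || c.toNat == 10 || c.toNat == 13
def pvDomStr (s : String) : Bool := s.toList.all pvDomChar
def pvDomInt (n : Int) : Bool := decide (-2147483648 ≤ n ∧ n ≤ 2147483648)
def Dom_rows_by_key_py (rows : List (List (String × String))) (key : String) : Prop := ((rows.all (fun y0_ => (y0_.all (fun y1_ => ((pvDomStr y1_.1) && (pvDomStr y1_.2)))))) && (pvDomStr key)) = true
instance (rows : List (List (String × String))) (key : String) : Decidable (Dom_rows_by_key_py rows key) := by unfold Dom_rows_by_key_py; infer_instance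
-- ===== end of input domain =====

-- B replaces A's forward dedup-dict pass plus sorted(keys) with a REVERSE scan using a
-- first-wins seen-set (the last original occurrence of a token is met first) that inserts
-- each new (token, row-copy) pair at its sorted position in an always-sorted list; no dict
-- during the loop and no sort call (objective: alternative algorithm, similar cost).

-- On the typed domain rows is always a list and every row a Mapping, so A's `_as_list(rows)`
-- is the identity and `isinstance(row, Mapping)` never skips.
-- token = str(dict(row).get(key, "")).strip()  (str() of a str is the identity):
def pvTok (key : String) (row : List (String × String)) : String :=
  PySem.Str.strip ((PySem.Dict.ofList row).getD key "")

-- dict(row): an independent dict copy of the row, as an items list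
def pvRow (row : List (String × String)) : List (String × String) :=
  (PySem.Dict.ofList row).items

-- ===== PORT A =====
def rows_by_key_py (rows : List (List (String × String))) (key : String) : List (String × List (String × String)) :=
  let out : PySem.Dict String (List (String × String)) :=
    rows.foldl (fun out row =>
      let token := pvTok key row
      if token ≠ "" then out.insert token (pvRow row) else out) PySem.Dict.empty
  -- dict((token, dict(out[token])) for token in sorted(out.keys())): out's keys are
  -- distinct, so this dict is exactly the list of pairs in sorted key order
  (PySem.List.sorted out.keys (fun t => t)).map (fun token => (token, out.getD token []))

-- ===== PORT B =====
-- the hand-written while-loop insertion of Source B: skip while result[i][0] < token,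
-- insert at the first position whose key is not < token
def pvInsB (x : String × List (String × String)) :
    List (String × List (String × String)) → List (String × List (String × String))
  | [] => [x]
  | y :: ys => if y.1 < x.1 then y :: pvInsB x ys else x :: y :: ys

def rows_by_key_py_alt (rows : List (List (String × String))) (key : String) : List (String × List (String × String)) :=
  let st :=
    rows.reverse.foldl
      (fun (st : List (String × List (String × String)) × PySem.Set String) row =>
        let token := pvTok key row
        if token = "" ∨ PySem.Set.contains st.2 token then st
        else (pvInsB (token, pvRow row) st.1, PySem.Set.add st.2 token))
      ([], PySem.Set.empty)
  (PySem.Dict.ofList st.1).items   -- return dict(result)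

-- ===== PRECONDITION & SPEC =====
def Spec_rows_by_key_py (rows : List (List (String × String))) (key : String) (out : List (String × List (String × String))) : Prop := out = rows_by_key_py_alt rows key
instance (rows : List (List (String × String))) (key : String) (out : List (String × List (String × String))) : Decidable (Spec_rows_by_key_py rows key out) := by unfold Spec_rows_by_key_py; infer_instance

-- ===== CLAIM (what is proved, stated in full; the proofs are below) =====
def Claim_equal_rows_by_key_py : Prop := ∀ (rows : List (List (String × String))) (key : String), Dom_rows_by_key_py rows key → Spec_rows_by_key_py rows key (rows_by_key_py rows key)

-- ===== LEMMAS AND PROOFS =====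

-- the filtered/keyed pair list both sides are about
def pvPairs (rows : List (List (String × String))) (key : String) : List (String × List (String × String)) :=
  (rows.filter (fun row => pvTok key row ≠ "")).map (fun row => (pvTok key row, pvRow row))

-- "p is a kept entry": p.2 is the LAST value paired with token p.1 in the pair list
def pvP (qs : List (String × List (String × String))) (p : String × List (String × String)) : Prop :=
  ((qs.filter (fun q => q.1 == p.1)).map Prod.snd).getLast? = some p.2

-- B's per-pair step after stripping the empty-token skip
def pvBstep (p : String × List (String × String))
    (st : List (String × List (String × String)) × PySem.Set String) :
    List (String × List (String × String)) × PySem.Set String :=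
  if PySem.Set.contains st.2 p.1 then st else (pvInsB p st.1, PySem.Set.add st.2 p.1)

-- the dict-building fold of A
def pvD (qs : List (String × List (String × String))) (d : PySem.Dict String (List (String × String))) : PySem.Dict String (List (String × String)) :=
  qs.foldl (fun d p => d.insert p.1 p.2) d

lemma contains_decide (s : PySem.Set String) (x : String) :
    PySem.Set.contains s x = decide (x ∈ s) := by
  simp [PySem.Set.contains]

lemma getLast?_cons_or {α : Type} (a : α) (m : List α) :
    (a :: m).getLast? = m.getLast?.or (some a) := by
  induction m with
  | nil => rfl
  | cons b m ih =>
    rw [List.getLast?_cons_cons]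
    cases h : (b :: m).getLast? with
    | none => simp [List.getLast?_eq_none_iff] at h
    | some v => simp

lemma get?_pvD (qs : List (String × List (String × String))) (d : PySem.Dict String (List (String × String))) (t : String) :
    (pvD qs d).get? t = ((qs.filter (fun p => p.1 == t)).map Prod.snd).getLast?.or (d.get? t) := by
  induction qs generalizing d with
  | nil => simp [pvD]
  | cons p qs ih =>
    show (pvD qs (d.insert p.1 p.2)).get? t = _
    rw [ih]
    by_cases h : p.1 = t
    · subst h
      simp only [List.filter_cons, beq_self_eq_true, if_pos, List.map_cons,
        PySem.Dict.get?_insert_self, getLast?_cons_or, Option.or_assoc]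
      simp
    · rw [PySem.Dict.get?_insert]
      simp [h, Ne.symm h]

lemma keys_pvD (qs : List (String × List (String × String))) :
    (pvD qs PySem.Dict.empty).keys = PySem.Set.ofList (qs.map (·.1)) := by
  show (qs.foldl (fun d p => d.insert p.1 p.2) PySem.Dict.empty).keys = _
  rw [PySem.Dict.keys_foldl_insert_key qs (fun p => p.1) (fun _ p => p.2)]
  simp [PySem.Set.update, PySem.Set.ofList_eq_foldl]

-- membership characterisation of A's result list
lemma memA (qs : List (String × List (String × String))) (p : String × List (String × String)) :
    p ∈ (PySem.List.sorted (pvD qs PySem.Dict.empty).keys (fun t => t)).map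
        (fun t => (t, (pvD qs PySem.Dict.empty).getD t [])) ↔ pvP qs p := by
  have hget : ∀ t, (pvD qs PySem.Dict.empty).get? t
      = ((qs.filter (fun q => q.1 == t)).map Prod.snd).getLast? := by
    intro t; rw [get?_pvD]; simp
  have hmemk : ∀ t : String, t ∈ (pvD qs PySem.Dict.empty).keys ↔ t ∈ qs.map (·.1) := by
    intro t; rw [keys_pvD, PySem.Set.mem_ofList]
  rw [List.mem_map]
  constructor
  · rintro ⟨t, ht, rfl⟩
    have htk : t ∈ qs.map (·.1) := (hmemk t).mp ((PySem.List.mem_sorted _ _ _ _).mp ht)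
    obtain ⟨q, hq, hqt⟩ := List.mem_map.mp htk
    have hne : (qs.filter (fun q => q.1 == t)).map Prod.snd ≠ [] := by
      simp only [ne_eq, List.map_eq_nil_iff, List.filter_eq_nil_iff]
      intro h
      exact h q hq (by simp [hqt])
    obtain ⟨v, hv⟩ := Option.isSome_iff_exists.mp (List.getLast?_isSome.mpr hne)
    have : (pvD qs PySem.Dict.empty).getD t [] = v := by
      rw [PySem.Dict.getD_eq_get?_getD, hget, hv]; rfl
    rw [this]
    show ((qs.filter (fun q => q.1 == t)).map Prod.snd).getLast? = some v
    exact hv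
  · intro hp
    refine ⟨p.1, ?_, ?_⟩
    · rw [PySem.List.mem_sorted]
      refine (hmemk p.1).mpr ?_
      have hne : qs.filter (fun q => q.1 == p.1) ≠ [] := by
        intro h
        rw [pvP, h] at hp
        simp at hp
      obtain ⟨q, hq⟩ := List.exists_mem_of_ne_nil _ hne
      have := List.mem_filter.mp hq
      exact List.mem_map.mpr ⟨q, this.1, by simpa using this.2⟩
    · have : (pvD qs PySem.Dict.empty).getD p.1 [] = p.2 := by
        rw [PySem.Dict.getD_eq_get?_getD, hget, hp]; rfl
      rw [this]

-- membership in the while-loop insertion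
lemma mem_pvInsB (x p : String × List (String × String)) :
    ∀ ys, p ∈ pvInsB x ys ↔ p = x ∨ p ∈ ys := by
  intro ys
  induction ys with
  | nil => simp [pvInsB]
  | cons y ys ih =>
    show p ∈ (if y.1 < x.1 then y :: pvInsB x ys else x :: y :: ys) ↔ _
    split_ifs with h
    · simp only [List.mem_cons, ih]
      tauto
    · simp only [List.mem_cons]

-- insertion keeps the key list strictly increasing (for a fresh key)
lemma pairwise_pvInsB (x : String × List (String × String)) :
    ∀ ys : List (String × List (String × String)),
      (ys.map Prod.fst).Pairwise (· < ·) → x.1 ∉ ys.map Prod.fst →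
      ((pvInsB x ys).map Prod.fst).Pairwise (· < ·) := by
  intro ys
  induction ys with
  | nil => intro _ _; simp [pvInsB]
  | cons y ys ih =>
    intro h hn
    rw [List.map_cons] at h
    have hy : ∀ t ∈ ys.map Prod.fst, y.1 < t := fun t ht => (List.pairwise_cons.mp h).1 t ht
    have hn1 : x.1 ≠ y.1 := by intro he; exact hn (by simp [he])
    have hn2 : x.1 ∉ ys.map Prod.fst := fun hm => hn (by simp [hm])
    show ((if y.1 < x.1 then y :: pvInsB x ys else x :: y :: ys).map Prod.fst).Pairwise (· < ·)
    split_ifs with hlt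
    · rw [List.map_cons, List.pairwise_cons]
      refine ⟨?_, ih (List.pairwise_cons.mp h).2 hn2⟩
      intro t ht
      obtain ⟨q, hq, rfl⟩ := List.mem_map.mp ht
      rcases (mem_pvInsB x q ys).mp hq with rfl | hq'
      · exact hlt
      · exact hy _ (List.mem_map.mpr ⟨q, hq', rfl⟩)
    · have hxy : x.1 < y.1 := lt_of_le_of_ne (le_of_not_gt hlt) hn1
      rw [List.map_cons, List.map_cons, List.pairwise_cons]
      refine ⟨?_, h⟩
      intro t ht
      rcases List.mem_cons.mp ht with rfl | ht'
      · exact hxy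
      · exact lt_trans hxy (hy t ht')

-- the loop invariant of B's reverse scan: seen = kept keys; kept keys strictly sorted;
-- kept pairs are exactly the last-occurrence entries of the processed suffix
lemma pvInv (qs : List (String × List (String × String))) :
    (∀ t : String, t ∈ (qs.foldr pvBstep ([], PySem.Set.empty)).2 ↔
        t ∈ (qs.foldr pvBstep ([], PySem.Set.empty)).1.map Prod.fst)
    ∧ ((qs.foldr pvBstep ([], PySem.Set.empty)).1.map Prod.fst).Pairwise (· < ·)
    ∧ (∀ p, p ∈ (qs.foldr pvBstep ([], PySem.Set.empty)).1 ↔ pvP qs p) := by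
  induction qs with
  | nil =>
    refine ⟨by simp [PySem.Set.empty], by simp, ?_⟩
    intro p; simp [pvP]
  | cons q qs ih =>
    obtain ⟨I1, I2, I3⟩ := ih
    rw [List.foldr_cons]
    by_cases hc : PySem.Set.contains (qs.foldr pvBstep ([], PySem.Set.empty)).2 q.1 = true
    · -- token already seen: state unchanged
      have hstep : pvBstep q (qs.foldr pvBstep ([], PySem.Set.empty)) = qs.foldr pvBstep ([], PySem.Set.empty) := by
        rw [pvBstep, if_pos hc]
      rw [hstep]
      refine ⟨I1, I2, ?_⟩
      have hqk : q.1 ∈ (qs.foldr pvBstep ([], PySem.Set.empty)).1.map Prod.fst := by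
        refine (I1 q.1).mp ?_
        have h' := hc
        rw [contains_decide] at h'
        exact of_decide_eq_true h'
      obtain ⟨p', hp', hfst⟩ := List.mem_map.mp hqk
      have hlast : ((qs.filter (fun r => r.1 == q.1)).map Prod.snd).getLast? = some p'.2 := by
        have h3 := (I3 p').mp hp'
        rw [pvP] at h3
        rw [← hfst]
        exact h3
      intro p
      rw [I3 p]
      simp only [pvP, List.filter_cons]
      by_cases hp : q.1 = p.1
      · simp only [← hp, beq_self_eq_true, if_pos, List.map_cons, getLast?_cons_or, hlast]
        simp
      · have hb : (q.1 == p.1) = false := by simp [hp]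
        rw [hb]
        simp
    · -- fresh token: insert at sorted position, add to seen
      have hstep : pvBstep q (qs.foldr pvBstep ([], PySem.Set.empty)) =
          (pvInsB q (qs.foldr pvBstep ([], PySem.Set.empty)).1,
           PySem.Set.add (qs.foldr pvBstep ([], PySem.Set.empty)).2 q.1) := by
        rw [pvBstep, if_neg hc]
      rw [hstep]
      have hqk : q.1 ∉ (qs.foldr pvBstep ([], PySem.Set.empty)).1.map Prod.fst := by
        intro hm
        apply hc
        rw [contains_decide]
        exact decide_eq_true ((I1 q.1).mpr hm)
      have hfilter : (qs.filter (fun r => r.1 == q.1)) = [] := by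
        by_contra hne
        have hne' : (qs.filter (fun r => r.1 == q.1)).map Prod.snd ≠ [] := by
          simpa using hne
        obtain ⟨v, hv⟩ := Option.isSome_iff_exists.mp (List.getLast?_isSome.mpr hne')
        have hmem : (q.1, v) ∈ (qs.foldr pvBstep ([], PySem.Set.empty)).1 := by
          refine (I3 (q.1, v)).mpr ?_
          rw [pvP]
          exact hv
        exact hqk (List.mem_map.mpr ⟨(q.1, v), hmem, rfl⟩)
      refine ⟨?_, pairwise_pvInsB q _ I2 hqk, ?_⟩
      · intro t
        rw [PySem.Set.mem_add, I1 t]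
        constructor
        · rintro (hm | rfl)
          · obtain ⟨p', hp', rfl⟩ := List.mem_map.mp hm
            exact List.mem_map.mpr ⟨p', (mem_pvInsB q p' _).mpr (Or.inr hp'), rfl⟩
          · exact List.mem_map.mpr ⟨q, (mem_pvInsB q q _).mpr (Or.inl rfl), rfl⟩
        · intro hm
          obtain ⟨p', hp', rfl⟩ := List.mem_map.mp hm
          rcases (mem_pvInsB q p' _).mp hp' with rfl | hp''
          · exact Or.inr rfl
          · exact Or.inl (List.mem_map.mpr ⟨p', hp'', rfl⟩)
      · intro p
        rw [mem_pvInsB, I3 p]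
        simp only [pvP, List.filter_cons]
        by_cases hp : q.1 = p.1
        · simp only [← hp, beq_self_eq_true, if_pos, List.map_cons, getLast?_cons_or, hfilter]
          simp only [List.map_nil, List.getLast?_nil, Option.none_or]
          constructor
          · rintro (rfl | h2)
            · rfl
            · cases h2
          · intro h2
            have h2' : q.2 = p.2 := by injection h2
            exact Or.inl (Prod.ext_iff.mpr ⟨hp.symm, h2'.symm⟩)
        · have hb : (q.1 == p.1) = false := by simp [hp]
          rw [hb, if_neg (by simp)]
          constructor
          · rintro (rfl | h2)
            · exact absurd rfl hp
            · exact h2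
          · exact fun h2 => Or.inr h2

-- two lists of pairs with strictly increasing keys and the same members are equal
lemma sorted_mem_ext :
    ∀ (L1 L2 : List (String × List (String × String))),
      (L1.map Prod.fst).Pairwise (· < ·) → (L2.map Prod.fst).Pairwise (· < ·) →
      (∀ p, p ∈ L1 ↔ p ∈ L2) → L1 = L2 := by
  intro L1
  induction L1 with
  | nil =>
    intro L2 _ _ hm
    cases L2 with
    | nil => rfl
    | cons b l2 => exact absurd ((hm b).mpr List.mem_cons_self) (by simp)
  | cons a l1 ih =>
    intro L2 h1 h2 hm
    cases L2 with
    | nil => exact absurd ((hm a).mp List.mem_cons_self) (by simp)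
    | cons b l2 =>
      rw [List.map_cons] at h1 h2
      have hab : a = b := by
        by_contra hne
        have ha2 : a ∈ l2 := by
          rcases List.mem_cons.mp ((hm a).mp List.mem_cons_self) with h | h
          · exact absurd h hne
          · exact h
        have hb1 : b ∈ l1 := by
          rcases List.mem_cons.mp ((hm b).mpr List.mem_cons_self) with h | h
          · exact absurd h.symm hne
          · exact h
        have hlt1 : a.1 < b.1 :=
          (List.pairwise_cons.mp h1).1 b.1 (List.mem_map.mpr ⟨b, hb1, rfl⟩)
        have hlt2 : b.1 < a.1 :=
          (List.pairwise_cons.mp h2).1 a.1 (List.mem_map.mpr ⟨a, ha2, rfl⟩)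
        exact absurd (lt_trans hlt1 hlt2) (lt_irrefl _)
      subst hab
      have htail : l1 = l2 := by
        refine ih l2 (List.pairwise_cons.mp h1).2 (List.pairwise_cons.mp h2).2 ?_
        intro p
        constructor
        · intro hp
          rcases List.mem_cons.mp ((hm p).mp (List.mem_cons_of_mem _ hp)) with rfl | h
          · exact absurd ((List.pairwise_cons.mp h1).1 p.1 (List.mem_map.mpr ⟨p, hp, rfl⟩))
              (lt_irrefl _)
          · exact h
        · intro hp
          rcases List.mem_cons.mp ((hm p).mpr (List.mem_cons_of_mem _ hp)) with rfl | h
          · exact absurd ((List.pairwise_cons.mp h2).1 p.1 (List.mem_map.mpr ⟨p, hp, rfl⟩))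
              (lt_irrefl _)
          · exact h
      rw [htail]

-- dict(result) of a list with distinct keys is that list again
lemma items_ofList_nodup (L : List (String × List (String × String)))
    (h : (L.map Prod.fst).Nodup) : (PySem.Dict.ofList L).items = L := by
  have he : PySem.Dict.ofList L = L.foldl (fun d p => d.insert p.1 p.2) PySem.Dict.empty := rfl
  rw [he, PySem.Dict.items_foldl_insert_fresh (l := L) (k := Prod.fst) (v := Prod.snd)
    (d := (PySem.Dict.empty : PySem.Dict String (List (String × String))))
    (by intro a _; simp) h]
  have h0 : (PySem.Dict.empty : PySem.Dict String (List (String × String))).items = [] := rfl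
  rw [h0]
  simp

-- reduce B's reverse row loop to a foldr of pvBstep over the pair list
lemma foldr_rows_eq (key : String) (rows : List (List (String × String))) :
    ∀ (init : List (String × List (String × String)) × PySem.Set String),
      rows.reverse.foldl
        (fun (st : List (String × List (String × String)) × PySem.Set String) row =>
          let token := pvTok key row
          if token = "" ∨ PySem.Set.contains st.2 token then st
          else (pvInsB (token, pvRow row) st.1, PySem.Set.add st.2 token)) init
      = (pvPairs rows key).foldr pvBstep init := by
  induction rows with
  | nil => intro init; rfl
  | cons r rs ih =>
    intro init
    rw [List.reverse_cons, List.foldl_append, List.foldl_cons, List.foldl_nil, ih]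
    by_cases h : pvTok key r = ""
    · simp [pvPairs, h]
    · simp [pvPairs, pvBstep, h]

-- ===== VERDICT (by name: the statement is the Claim_ definition above) =====
theorem rows_by_key_py_spec : Claim_equal_rows_by_key_py := by
  intro rows key _
  unfold Spec_rows_by_key_py
  have hA : rows_by_key_py rows key
      = (PySem.List.sorted (pvD (pvPairs rows key) PySem.Dict.empty).keys (fun t => t)).map
          (fun t => (t, (pvD (pvPairs rows key) PySem.Dict.empty).getD t [])) := by
    unfold rows_by_key_py
    simp only [PySem.List.foldl_ite_eq_foldl_filter (fun row => pvTok key row ≠ "")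
      (fun (out : PySem.Dict String (List (String × String))) row =>
        out.insert (pvTok key row) (pvRow row))]
    rw [show ∀ l : List (List (String × String)),
          l.foldl (fun out row => out.insert (pvTok key row) (pvRow row)) PySem.Dict.empty =
            pvD (l.map (fun row => (pvTok key row, pvRow row))) PySem.Dict.empty from
        fun l => by simp [pvD, List.foldl_map]]
    rfl
  have hB : rows_by_key_py_alt rows key
      = (PySem.Dict.ofList ((pvPairs rows key).foldr pvBstep ([], PySem.Set.empty)).1).items := by
    simp only [rows_by_key_py_alt]
    rw [foldr_rows_eq key rows ([], PySem.Set.empty)]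
  obtain ⟨_, I2, I3⟩ := pvInv (pvPairs rows key)
  have hnd : (((pvPairs rows key).foldr pvBstep ([], PySem.Set.empty)).1.map Prod.fst).Nodup :=
    I2.imp (fun h => ne_of_lt h)
  rw [hA, hB, items_ofList_nodup _ hnd]
  refine sorted_mem_ext _ _ ?_ I2 ?_
  · have hmap : ((PySem.List.sorted (pvD (pvPairs rows key) PySem.Dict.empty).keys (fun t => t)).map
        (fun t => (t, (pvD (pvPairs rows key) PySem.Dict.empty).getD t []))).map Prod.fst
        = PySem.List.sorted (pvD (pvPairs rows key) PySem.Dict.empty).keys (fun t => t) := by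
      rw [List.map_map]
      rw [show ((Prod.fst : String × List (String × String) → String) ∘
          fun t => (t, (pvD (pvPairs rows key) PySem.Dict.empty).getD t [])) = id from rfl,
        List.map_id]
    rw [hmap, keys_pvD]
    exact PySem.List.sorted_ofList_pairwise_lt ((pvPairs rows key).map (·.1))
  · intro p
    exact (memA (pvPairs rows key) p).trans (I3 p).symm
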